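-- pv_equiv track=rewrite | github.com/jpittard/stigs | v3/comment_v3.py | get_latest_comment
-- ===== SOURCE A (Python) =====
-- def get_latest_comment(text):
--     if text is None:
--         return None
--     lines = text.split('\n')
--     if len(lines) <= 1:
--         return text
--     pos = 1
--     for line in lines[1:]:
--         if ' validated on ' in line:
--             break
--         else:
--             pos += 1
--     return '\n'.join(lines[1:pos])
-- ===== SOURCE B (Python) =====
-- def get_latest_comment(text):
--     if text is None:
--         return None
--     nl = text.find('\n')
--     if nl == -1:
--         return text
--     rest = text[nl + 1:]
--     idx = rest.find(' validated on ')
--     if idx == -1: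
--         return rest
--     cut = rest.rfind('\n', 0, idx)
--     return '' if cut == -1 else rest[:cut]
-- ===== Notes on version B (the rewrite author's own statement) =====
-- stated objective: alternative
-- what changed: B drops A's split-into-a-line-list, position-counting loop and slice-rejoin, and instead scans the raw string: it locates the first newline, searches the remainder for the first marker occurrence with str.find, and cuts at the last newline before that occurrence with str.rfind.
import Mathlib
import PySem

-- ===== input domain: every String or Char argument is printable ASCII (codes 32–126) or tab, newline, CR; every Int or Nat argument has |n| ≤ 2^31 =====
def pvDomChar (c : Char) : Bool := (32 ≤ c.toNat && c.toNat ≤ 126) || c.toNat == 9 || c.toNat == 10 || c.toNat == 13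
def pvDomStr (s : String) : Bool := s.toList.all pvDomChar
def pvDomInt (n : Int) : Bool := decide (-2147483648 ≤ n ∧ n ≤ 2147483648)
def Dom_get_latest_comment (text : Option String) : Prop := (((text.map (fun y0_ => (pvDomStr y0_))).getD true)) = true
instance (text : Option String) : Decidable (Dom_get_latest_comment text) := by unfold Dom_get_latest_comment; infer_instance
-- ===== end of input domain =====

-- B replaces A's split-into-lines + counting loop + re-join by direct substring search on the raw
-- text (find/rfind and slicing); same return value, a different traversal (objective: alternative).

-- ===== PORT A =====
def pvMarker : List Char := " validated on ".toList

def pvALoop (ls : List (List Char)) (pos : Nat) : Nat :=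
  match ls with
  | [] => pos
  | line :: rest => if PySem.Chars.isIn pvMarker line then pos else pvALoop rest (pos + 1)

def get_latest_comment (text : Option String) : Option String :=
  match text with
  | none => none
  | some t =>
    let lines := PySem.Chars.splitOn t.toList ['\n']
    if lines.length ≤ 1 then some t
    else
      let pos := pvALoop (PySem.List.slice lines (some 1) none) 1
      some (String.ofList (PySem.Chars.join ['\n'] (PySem.List.slice lines (some 1) (some (pos : Int)))))

-- ===== PORT B =====
def get_latest_comment_alt (text : Option String) : Option String :=
  match text with
  | none => none
  | some t =>
    let nl := PySem.Chars.find t.toList ['\n']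
    if nl = -1 then some t
    else
      let rest := PySem.Chars.slice t.toList (some (nl + 1)) none
      let idx := PySem.Chars.find rest pvMarker
      if idx = -1 then some (String.ofList rest)
      else
        let cut := PySem.Chars.rfindFrom rest ['\n'] 0 (some idx)
        if cut = -1 then some "" else some (String.ofList (PySem.Chars.slice rest none (some cut)))

-- ===== PRECONDITION & SPEC =====
def Spec_get_latest_comment (text : Option String) (out : Option String) : Prop := out = get_latest_comment_alt text
instance (text : Option String) (out : Option String) : Decidable (Spec_get_latest_comment text out) := by unfold Spec_get_latest_comment; infer_instance

-- ===== CLAIM (what is proved, stated in full; the proofs are below) =====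
def Claim_equal_get_latest_comment : Prop := ∀ (text : Option String), Dom_get_latest_comment text → Spec_get_latest_comment text (get_latest_comment text)

-- ===== LEMMAS AND PROOFS =====
theorem fgo_neg_one_le (sub l : List Char) : -1 ≤ PySem.Chars.find.go sub l 0 :=
  PySem.Chars.neg_one_le_find l sub

theorem fgo_off (sub l : List Char) (hsub : sub ≠ []) (k : Nat) :
    PySem.Chars.find.go sub l k =
      if PySem.Chars.find.go sub l 0 = -1 then -1 else k + PySem.Chars.find.go sub l 0 := by
  induction l generalizing k with
  | nil => simp [PySem.Chars.find.go, List.isEmpty_iff, hsub]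
  | cons c t ih =>
    rw [PySem.Chars.find.go, PySem.Chars.find.go]
    by_cases hp : sub.isPrefixOf (c :: t)
    · simp [hp]
    · have hle := fgo_neg_one_le sub t
      simp only [hp, Bool.false_eq_true, if_false]
      rw [ih (k+1), ih 1]
      set f := PySem.Chars.find.go sub t 0 with hf
      by_cases h0 : f = -1
      · simp [h0]
      · have h1 : ¬((1:Int) + f = -1) := by omega
        simp [h0, h1]
        push_cast; ring

theorem find_cons (sub : List Char) (hsub : sub ≠ []) (c : Char) (t : List Char) :
    PySem.Chars.find (c :: t) sub =
      if sub <+: c :: t then 0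
      else if PySem.Chars.find t sub = -1 then -1 else 1 + PySem.Chars.find t sub := by
  rw [PySem.Chars.find, PySem.Chars.find.go]
  by_cases hp : sub.isPrefixOf (c :: t)
  · simp [hp, List.isPrefixOf_iff_prefix.mp hp]
  · have : ¬ sub <+: c :: t := fun h => hp (List.isPrefixOf_iff_prefix.mpr h)
    simp only [hp, if_false, this]
    exact fgo_off sub t hsub 1

theorem find_nil' (sub : List Char) (hsub : sub ≠ []) : PySem.Chars.find [] sub = -1 := by
  simp [PySem.Chars.find, PySem.Chars.find.go, List.isEmpty_iff, hsub]

-- prefix through a separator: c ∉ sub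
theorem prefix_append_sep (sub a b : List Char) (c : Char) (hc : c ∉ sub) :
    sub <+: a ++ c :: b ↔ sub <+: a := by
  constructor
  · intro h
    induction a generalizing sub with
    | nil =>
      cases sub with
      | nil => exact List.nil_prefix
      | cons x xs =>
        rw [List.nil_append, List.cons_prefix_cons] at h
        exact absurd (h.1 ▸ List.mem_cons_self) hc
    | cons d a' ih =>
      cases sub with
      | nil => exact List.nil_prefix
      | cons x xs =>
        rw [List.cons_append, List.cons_prefix_cons] at h
        have := ih xs (fun hm => hc (List.mem_cons_of_mem x hm)) h.2
        exact List.cons_prefix_cons.mpr ⟨h.1, this⟩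
  · intro h; exact h.trans (List.prefix_append a (c :: b))

-- infix through a separator char not in sub
theorem infix_append_sep (sub a b : List Char) (c : Char) (hc : c ∉ sub) (hsub : sub ≠ []) :
    sub <:+: a ++ c :: b ↔ sub <:+: a ∨ sub <:+: b := by
  constructor
  · intro h
    induction a with
    | nil =>
      rw [List.nil_append, List.infix_cons_iff] at h
      rcases h with h | h
      · cases sub with
        | nil => exact absurd rfl hsub
        | cons x xs =>
          rw [List.cons_prefix_cons] at h
          exact absurd (h.1 ▸ List.mem_cons_self) hc
      · exact Or.inr h
    | cons d a' ih =>
      rw [List.cons_append, List.infix_cons_iff] at h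
      rcases h with h | h
      · exact Or.inl ((prefix_append_sep sub (d :: a') b c hc).mp h).isInfix
      · rcases ih h with h | h
        · exact Or.inl (List.infix_cons_iff.mpr (Or.inr h))
        · exact Or.inr h
  · rintro (h | h)
    · exact h.trans ⟨[], c :: b, by simp⟩
    · exact h.trans ⟨a ++ [c], [], by simp⟩

-- find over a ++ c :: b when the needle occurs in a
theorem find_append_left (sub a b : List Char) (c : Char) (hc : c ∉ sub) (hsub : sub ≠ [])
    (ha : sub <:+: a) :
    PySem.Chars.find (a ++ c :: b) sub = PySem.Chars.find a sub := by
  induction a with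
  | nil => simp at ha; exact absurd ha hsub
  | cons d a' ih =>
    rw [List.cons_append, find_cons sub hsub, find_cons sub hsub]
    by_cases hp : sub <+: d :: a'
    · rw [if_pos (show sub <+: d :: (a' ++ c :: b) from (prefix_append_sep sub (d :: a') b c hc).mpr hp), if_pos hp]
    · have hp' : ¬ sub <+: d :: (a' ++ c :: b) :=
        fun h => hp ((prefix_append_sep sub (d :: a') b c hc).mp h)
      rw [if_neg hp', if_neg hp]
      have ha' : sub <:+: a' := (List.infix_cons_iff.mp ha).resolve_left hp
      have h1 : PySem.Chars.find a' sub ≠ -1 := (PySem.Chars.find_ne_neg_one_iff a' sub).mpr ha'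
      have h2 : PySem.Chars.find (a' ++ c :: b) sub ≠ -1 :=
        (PySem.Chars.find_ne_neg_one_iff (a' ++ c :: b) sub).mpr
          ((infix_append_sep sub a' b c hc hsub).mpr (Or.inl ha'))
      rw [if_neg h1, if_neg h2, ih ha']

-- find over a ++ c :: b when the needle does not occur in a
theorem find_append_right (sub a b : List Char) (c : Char) (hc : c ∉ sub) (hsub : sub ≠ [])
    (ha : ¬ sub <:+: a) :
    PySem.Chars.find (a ++ c :: b) sub =
      if PySem.Chars.find b sub = -1 then -1
      else (a.length : Int) + 1 + PySem.Chars.find b sub := by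
  induction a with
  | nil =>
    rw [List.nil_append, find_cons sub hsub]
    have hp : ¬ sub <+: c :: b := by
      intro h
      cases sub with
      | nil => exact hsub rfl
      | cons x xs =>
        rw [List.cons_prefix_cons] at h
        exact hc (h.1 ▸ List.mem_cons_self)
    rw [if_neg hp]
    have := PySem.Chars.neg_one_le_find b sub
    by_cases h0 : PySem.Chars.find b sub = -1
    · simp [h0]
    · rw [if_neg h0, if_neg h0]; simp
  | cons d a' ih =>
    have ha' : ¬ sub <:+: a' := fun h => ha (List.infix_cons_iff.mpr (Or.inr h))
    rw [List.cons_append, find_cons sub hsub]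
    have hp' : ¬ sub <+: d :: (a' ++ c :: b) := by
      intro h
      exact ha ((prefix_append_sep sub (d :: a') b c hc).mp h).isInfix
    rw [if_neg hp', ih ha']
    have := PySem.Chars.neg_one_le_find b sub
    by_cases h0 : PySem.Chars.find b sub = -1
    · simp [h0]
    · rw [if_neg h0, if_neg (show ¬((a'.length : Int) + 1 + PySem.Chars.find b sub = -1) by omega),
          if_neg h0]
      simp; omega

theorem rgo_shift (sub t : List Char) (c : Char) (j : Nat) :
    PySem.Chars.rfind.go (c :: t) sub (j + 1) =
      if PySem.Chars.rfind.go t sub j = -1 then (if sub <+: c :: t then 0 else -1)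
      else 1 + PySem.Chars.rfind.go t sub j := by
  induction j with
  | zero =>
    rw [PySem.Chars.rfind.go, PySem.Chars.rfind.go, PySem.Chars.rfind.go]
    simp only [show List.drop 1 (c :: t) = t from rfl, List.drop_zero,
      List.isPrefixOf_iff_prefix]
    by_cases h1 : sub <+: t <;> by_cases hp : sub <+: c :: t <;> simp [h1, hp]
  | succ j ih =>
    rw [PySem.Chars.rfind.go, show PySem.Chars.rfind.go t sub (j + 1) =
        if sub.isPrefixOf (List.drop (j + 1) t) then ((j : Int) + 1) else PySem.Chars.rfind.go t sub j
      from by rw [PySem.Chars.rfind.go]; norm_num]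
    by_cases h1 : sub.isPrefixOf (List.drop (j + 1 + 1) (c :: t))
    · have h1' : sub.isPrefixOf (List.drop (j + 1) t) := by simpa using h1
      rw [if_pos h1, if_pos h1']
      rw [if_neg (by omega)]
      push_cast; ring
    · have h1' : ¬ sub.isPrefixOf (List.drop (j + 1) t) := by simpa using h1
      rw [if_neg h1, if_neg h1', ih]

theorem rfind_cons (sub t : List Char) (c : Char) :
    PySem.Chars.rfind (c :: t) sub =
      if PySem.Chars.rfind t sub = -1 then (if sub <+: c :: t then 0 else -1)
      else 1 + PySem.Chars.rfind t sub := by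
  rw [PySem.Chars.rfind, PySem.Chars.rfind,
    show (c :: t).length = t.length + 1 from rfl]
  exact rgo_shift sub t c t.length

theorem rfind_nil (sub : List Char) (hsub : sub ≠ []) : PySem.Chars.rfind [] sub = -1 := by
  rw [PySem.Chars.rfind, show ([] : List Char).length = 0 from rfl, PySem.Chars.rfind.go]
  have : ¬ sub.isPrefixOf ([] : List Char) := by
    simpa [List.isPrefixOf_iff_prefix, List.prefix_nil] using hsub
  simp [this]

-- no newline in u → rfind u ['\n'] = -1
theorem rfind_single_not_mem (u : List Char) (c : Char) (hc : c ∉ u) :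
    PySem.Chars.rfind u [c] = -1 := by
  induction u with
  | nil => exact rfind_nil [c] (by simp)
  | cons d t ih =>
    rw [rfind_cons, ih (fun h => hc (List.mem_cons_of_mem d h))]
    have : ¬ [c] <+: d :: t := by
      intro h
      rw [List.cons_prefix_cons] at h
      exact hc (h.1 ▸ List.mem_cons_self)
    simp [this]

theorem rgo_neg_one_le (u sub : List Char) (j : Nat) : -1 ≤ PySem.Chars.rfind.go u sub j := by
  induction j with
  | zero => rw [PySem.Chars.rfind.go.eq_def]; split <;> omega
  | succ j ih =>
    rw [PySem.Chars.rfind.go]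
    split
    · omega
    · exact ih

theorem rfind_neg_one_le (u sub : List Char) : -1 ≤ PySem.Chars.rfind u sub :=
  rgo_neg_one_le u sub u.length

-- rfind of the separator over l ++ c :: t when c ∉ l
theorem rfind_append_sep (l t : List Char) (c : Char) (hl : c ∉ l) :
    PySem.Chars.rfind (l ++ c :: t) [c] =
      if PySem.Chars.rfind t [c] = -1 then (l.length : Int)
      else (l.length : Int) + 1 + PySem.Chars.rfind t [c] := by
  induction l with
  | nil =>
    rw [List.nil_append, rfind_cons]
    have hp : [c] <+: c :: t := by simp [List.cons_prefix_cons]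
    have := rfind_neg_one_le t [c]
    by_cases h0 : PySem.Chars.rfind t [c] = -1
    · simp [h0, hp]
    · rw [if_neg h0, if_neg h0]; simp
  | cons d l' ih =>
    have hd : c ≠ d := fun h => hl (h ▸ List.mem_cons_self)
    have hl' : c ∉ l' := fun h => hl (List.mem_cons_of_mem d h)
    rw [List.cons_append, rfind_cons, ih hl']
    have := rfind_neg_one_le t [c]
    by_cases h0 : PySem.Chars.rfind t [c] = -1
    · have hne : ¬((l'.length : Int) = -1) := by omega
      simp [h0, hne]
      push_cast; omega
    · have hne : ¬((l'.length : Int) + 1 + PySem.Chars.rfind t [c] = -1) := by omega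
      simp [h0, hne]
      push_cast; omega

-- splitOn.go: accumulator law
theorem sgo_acc (sep : List Char) (fuel : Nat) (l cur : List Char) (acc : List (List Char)) :
    PySem.Chars.splitOn.go sep fuel l cur acc =
      acc.reverse ++ PySem.Chars.splitOn.go sep fuel l cur [] := by
  induction fuel generalizing l cur acc with
  | zero => rw [PySem.Chars.splitOn.go, PySem.Chars.splitOn.go]; simp
  | succ fuel ih =>
    cases l with
    | nil =>
      rw [PySem.Chars.splitOn.go, PySem.Chars.splitOn.go]
      · simp
      all_goals omega
    | cons c rest =>
      rw [PySem.Chars.splitOn.go, PySem.Chars.splitOn.go]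
      by_cases hp : sep.isPrefixOf (c :: rest)
      · simp only [hp, if_true]
        rw [ih _ _ (cur.reverse :: acc), ih _ _ [cur.reverse]]
        simp
      · simp only [hp, Bool.false_eq_true, if_false]
        exact ih rest (c :: cur) acc

-- consuming a separator-free chunk
theorem sgo_clean (c0 : Char) (a : List Char) (ha : c0 ∉ a) (fuel : Nat) (hf : a.length ≤ fuel)
    (cur : List Char) (acc : List (List Char)) :
    PySem.Chars.splitOn.go [c0] fuel a cur acc = ((cur.reverse ++ a) :: acc).reverse := by
  induction a generalizing fuel cur with
  | nil =>
    cases fuel with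
    | zero => rw [PySem.Chars.splitOn.go]
    | succ fuel =>
      rw [PySem.Chars.splitOn.go]
      · simp
      all_goals omega
  | cons d a' ih =>
    cases fuel with
    | zero => simp at hf
    | succ fuel =>
      rw [PySem.Chars.splitOn.go]
      have hp : ¬ ([c0]).isPrefixOf (d :: a') := by
        simp [List.isPrefixOf_iff_prefix, List.cons_prefix_cons]
        intro h; exact absurd (h ▸ List.mem_cons_self) ha
      simp only [hp, Bool.false_eq_true, if_false]
      rw [ih (fun h => ha (List.mem_cons_of_mem d h)) fuel (by simpa using hf) (d :: cur)]
      simp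

-- consuming a chunk up to the first separator
theorem sgo_sep (c0 : Char) (a b : List Char) (ha : c0 ∉ a) (fuel : Nat)
    (hf : a.length + 1 ≤ fuel) (cur : List Char) (acc : List (List Char)) :
    PySem.Chars.splitOn.go [c0] fuel (a ++ c0 :: b) cur acc =
      PySem.Chars.splitOn.go [c0] (fuel - a.length - 1) b [] ((cur.reverse ++ a) :: acc) := by
  induction a generalizing fuel cur with
  | nil =>
    cases fuel with
    | zero => omega
    | succ fuel =>
      rw [List.nil_append, PySem.Chars.splitOn.go]
      have hp : ([c0]).isPrefixOf (c0 :: b) := by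
        simp [List.isPrefixOf_iff_prefix, List.cons_prefix_cons]
      simp only [hp, if_true]
      simp
  | cons d a' ih =>
    cases fuel with
    | zero => omega
    | succ fuel =>
      rw [List.cons_append, PySem.Chars.splitOn.go]
      have hp : ¬ ([c0]).isPrefixOf (d :: (a' ++ c0 :: b)) := by
        simp [List.isPrefixOf_iff_prefix, List.cons_prefix_cons]
        intro h; exact absurd (h ▸ List.mem_cons_self) ha
      simp only [hp, Bool.false_eq_true, if_false]
      have hf' : a'.length + 1 ≤ fuel := by simp at hf; omega
      rw [ih (fun h => ha (List.mem_cons_of_mem d h)) fuel hf' (d :: cur)]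
      have hlen : fuel - a'.length - 1 = fuel + 1 - (d :: a').length - 1 := by simp
      rw [hlen]
      simp

theorem splitOn_clean (c0 : Char) (a : List Char) (ha : c0 ∉ a) :
    PySem.Chars.splitOn a [c0] = [a] := by
  rw [PySem.Chars.splitOn, sgo_clean c0 a ha _ (by omega) [] []]
  simp

theorem splitOn_sep (c0 : Char) (a b : List Char) (ha : c0 ∉ a) :
    PySem.Chars.splitOn (a ++ c0 :: b) [c0] = a :: PySem.Chars.splitOn b [c0] := by
  rw [PySem.Chars.splitOn, sgo_sep c0 a b ha _ (by simp) [] []]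
  rw [sgo_acc]
  have : (a ++ c0 :: b).length + 1 - a.length - 1 = b.length + 1 := by simp; omega
  rw [this]
  simp [PySem.Chars.splitOn]

theorem singleton_prefix_iff (c : Char) (u : List Char) : [c] <+: u ↔ u.head? = some c := by
  cases u with
  | nil => simp
  | cons d t => simp [List.cons_prefix_cons]; tauto

-- first-separator decomposition
theorem first_sep_decomp (c0 : Char) (b : List Char) (hm : c0 ∈ b) :
    ∃ a b', b = a ++ c0 :: b' ∧ c0 ∉ a := by
  induction b with
  | nil => simp at hm
  | cons d t ih =>
    by_cases hd : d = c0
    · exact ⟨[], t, by simp [hd], by simp⟩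
    · have : c0 ∈ t := by
        rcases List.mem_cons.mp hm with h | h
        · exact absurd h.symm hd
        · exact h
      obtain ⟨a, b', hb, hna⟩ := ih this
      exact ⟨d :: a, b', by simp [hb], by simp [hna]; exact fun h => hd h.symm⟩

theorem splitOn_props (c0 : Char) : ∀ (n : Nat) (b : List Char), b.length ≤ n →
    PySem.Chars.splitOn b [c0] ≠ [] ∧
    PySem.Chars.join [c0] (PySem.Chars.splitOn b [c0]) = b ∧
    ∀ l ∈ PySem.Chars.splitOn b [c0], c0 ∉ l := by
  intro n
  induction n with
  | zero =>
    intro b hb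
    have : b = [] := List.length_eq_zero_iff.mp (Nat.le_zero.mp hb)
    subst this
    rw [splitOn_clean c0 [] (by simp)]
    refine ⟨by simp, PySem.Chars.join_singleton _ _, by simp⟩
  | succ n ih =>
    intro b hb
    by_cases hm : c0 ∈ b
    · obtain ⟨a, b', rfl, hna⟩ := first_sep_decomp c0 b hm
      rw [splitOn_sep c0 a b' hna]
      have hb' : b'.length ≤ n := by simp at hb; omega
      obtain ⟨hne, hjoin, hmem⟩ := ih b' hb'
      refine ⟨by simp, ?_, ?_⟩
      · cases hsp : PySem.Chars.splitOn b' [c0] with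
        | nil => exact absurd hsp hne
        | cons x xs =>
          rw [PySem.Chars.join_cons_cons]
          rw [← hsp, hjoin]
          simp
      · intro l hl
        rcases List.mem_cons.mp hl with h | h
        · exact h ▸ hna
        · exact hmem l h
    · rw [splitOn_clean c0 b hm]
      exact ⟨by simp, PySem.Chars.join_singleton _ _, by simp [hm]⟩

theorem take_append_exact (l t : List Char) (n : Nat) :
    (l ++ t).take (l.length + n) = l ++ t.take n := by
  rw [List.take_append]
  simp

theorem bcore_spec (M : List Char) (hM : M ≠ []) (hMn : '\n' ∉ M) :
    ∀ (ls : List (List Char)), (∀ l ∈ ls, '\n' ∉ l) →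
    (PySem.Chars.find (PySem.Chars.join ['\n'] ls) M = -1 →
        ∀ l ∈ ls, PySem.Chars.isIn M l = false) ∧
    (PySem.Chars.find (PySem.Chars.join ['\n'] ls) M ≠ -1 →
      (PySem.Chars.rfind ((PySem.Chars.join ['\n'] ls).take
          (PySem.Chars.find (PySem.Chars.join ['\n'] ls) M).toNat) ['\n'] = -1 →
        ls.takeWhile (fun l => !(PySem.Chars.isIn M l)) = []) ∧
      (PySem.Chars.rfind ((PySem.Chars.join ['\n'] ls).take
          (PySem.Chars.find (PySem.Chars.join ['\n'] ls) M).toNat) ['\n'] ≠ -1 →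
        (PySem.Chars.join ['\n'] ls).take
            (PySem.Chars.rfind ((PySem.Chars.join ['\n'] ls).take
              (PySem.Chars.find (PySem.Chars.join ['\n'] ls) M).toNat) ['\n']).toNat
          = PySem.Chars.join ['\n'] (ls.takeWhile (fun l => !(PySem.Chars.isIn M l))) ∧
        ls.takeWhile (fun l => !(PySem.Chars.isIn M l)) ≠ [])) := by
  intro ls
  induction ls with
  | nil =>
    intro _
    rw [PySem.Chars.join_nil]
    refine ⟨fun _ l hl => by simp at hl, fun hne => absurd (find_nil' M hM) hne⟩
  | cons l ls' ih =>
    intro hls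
    have hnl : '\n' ∉ l := hls l List.mem_cons_self
    have hls' : ∀ x ∈ ls', '\n' ∉ x := fun x hx => hls x (List.mem_cons_of_mem l hx)
    by_cases hPl : PySem.Chars.isIn M l = true
    · have hinf : M <:+: l := (PySem.Chars.isIn_iff_infix M l).mp hPl
      have htw : (l :: ls').takeWhile (fun x => !(PySem.Chars.isIn M x)) = [] := by
        simp [hPl]
      cases ls' with
      | nil =>
        rw [PySem.Chars.join_singleton]
        have hfd : PySem.Chars.find l M ≠ -1 := (PySem.Chars.find_ne_neg_one_iff l M).mpr hinf
        refine ⟨fun h => absurd h hfd, fun _ => ⟨fun _ => htw, fun hcut => ?_⟩⟩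
        exact absurd (rfind_single_not_mem _ '\n'
          (fun h => hnl (List.mem_of_mem_take h))) hcut
      | cons l2 ls'' =>
        rw [PySem.Chars.join_cons_cons]
        rw [show l ++ ['\n'] ++ PySem.Chars.join ['\n'] (l2 :: ls'') =
            l ++ '\n' :: PySem.Chars.join ['\n'] (l2 :: ls'') by simp]
        rw [find_append_left M l _ '\n' hMn hM hinf]
        have h0 : 0 ≤ PySem.Chars.find l M := (PySem.Chars.find_nonneg_iff l M).mpr hinf
        have hle : PySem.Chars.find l M ≤ (l.length : Int) := PySem.Chars.find_le_length l M
        have hfd : PySem.Chars.find l M ≠ -1 := by omega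
        have htake : (l ++ '\n' :: PySem.Chars.join ['\n'] (l2 :: ls'')).take
            (PySem.Chars.find l M).toNat = l.take (PySem.Chars.find l M).toNat :=
          List.take_append_of_le_length (by omega)
        refine ⟨fun h => absurd h hfd, fun _ => ⟨fun _ => htw, fun hcut => ?_⟩⟩
        rw [htake] at hcut
        exact absurd (rfind_single_not_mem _ '\n'
          (fun h => hnl (List.mem_of_mem_take h))) hcut
    · have hPl' : PySem.Chars.isIn M l = false := by simpa using hPl
      have hinf' : ¬ M <:+: l := by
        rw [← PySem.Chars.isIn_iff_infix M l, hPl']; simp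
      have htw : (l :: ls').takeWhile (fun x => !(PySem.Chars.isIn M x)) =
          l :: ls'.takeWhile (fun x => !(PySem.Chars.isIn M x)) := by
        simp [hPl']
      cases ls' with
      | nil =>
        rw [PySem.Chars.join_singleton]
        have hfd : PySem.Chars.find l M = -1 := (PySem.Chars.find_eq_neg_one_iff l M).mpr hinf'
        refine ⟨fun _ x hx => ?_, fun hne => absurd hfd hne⟩
        rcases List.mem_cons.mp hx with h | h
        · exact h ▸ hPl'
        · simp at h
      | cons l2 ls'' =>
        rw [PySem.Chars.join_cons_cons]
        rw [show l ++ ['\n'] ++ PySem.Chars.join ['\n'] (l2 :: ls'') =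
            l ++ '\n' :: PySem.Chars.join ['\n'] (l2 :: ls'') by simp]
        set J' := PySem.Chars.join ['\n'] (l2 :: ls'') with hJ'
        set idx' := PySem.Chars.find J' M with hidx'
        rw [find_append_right M l J' '\n' hMn hM hinf']
        obtain ⟨ih1, ih2⟩ := ih hls'
        by_cases h0 : idx' = -1
        · rw [if_pos (by rw [← hidx']; exact h0)]
          refine ⟨fun _ x hx => ?_, fun hne => absurd rfl hne⟩
          rcases List.mem_cons.mp hx with h | h
          · exact h ▸ hPl'
          · exact ih1 h0 x h
        · rw [if_neg (by rw [← hidx']; exact h0)]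
          have hge : 0 ≤ idx' := by
            have := PySem.Chars.neg_one_le_find J' M
            rw [← hidx'] at this; omega
          have hne2 : (l.length : Int) + 1 + idx' ≠ -1 := by omega
          have htake : (l ++ '\n' :: J').take ((l.length : Int) + 1 + idx').toNat =
              l ++ '\n' :: J'.take idx'.toNat := by
            rw [show ((l.length : Int) + 1 + idx').toNat = l.length + (1 + idx'.toNat) by omega,
              take_append_exact]
            rw [show (1 + idx'.toNat) = idx'.toNat + 1 by omega, List.take_succ_cons]
          refine ⟨fun h => absurd h hne2, fun _ => ?_⟩
          rw [htake]
          rw [rfind_append_sep l (J'.take idx'.toNat) '\n' hnl]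
          obtain ⟨ihc1, ihc2⟩ := ih2 h0
          by_cases hc' : PySem.Chars.rfind (J'.take idx'.toNat) ['\n'] = -1
          · rw [if_pos hc']
            refine ⟨fun h => absurd h (by omega), fun _ => ?_⟩
            have htw' : (l2 :: ls'').takeWhile (fun x => !(PySem.Chars.isIn M x)) = [] := ihc1 hc'
            rw [htw, htw']
            refine ⟨?_, by simp⟩
            rw [show ((l.length : Int)).toNat = l.length by omega]
            rw [List.take_append_of_le_length (by omega), List.take_length,
              PySem.Chars.join_singleton]
          · rw [if_neg hc']
            have hcge : 0 ≤ PySem.Chars.rfind (J'.take idx'.toNat) ['\n'] := by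
              have := rfind_neg_one_le (J'.take idx'.toNat) ['\n']; omega
            refine ⟨fun h => absurd h (by omega), fun _ => ?_⟩
            obtain ⟨hEq, hNe⟩ := ihc2 hc'
            rw [show ((l.length : Int) + 1 + PySem.Chars.rfind (J'.take idx'.toNat) ['\n']).toNat
                = l.length + (1 + (PySem.Chars.rfind (J'.take idx'.toNat) ['\n']).toNat) by omega,
              take_append_exact, htw]
            rw [show (1 + (PySem.Chars.rfind (J'.take idx'.toNat) ['\n']).toNat)
                = (PySem.Chars.rfind (J'.take idx'.toNat) ['\n']).toNat + 1 by omega,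
              List.take_succ_cons, hEq]
            cases htww : (l2 :: ls'').takeWhile (fun x => !(PySem.Chars.isIn M x)) with
            | nil => exact absurd htww hNe
            | cons w ws =>
              rw [PySem.Chars.join_cons_cons]
              exact ⟨by simp, by simp⟩

theorem pvALoop_spec (ls : List (List Char)) (p : Nat) :
    pvALoop ls p = (ls.takeWhile (fun l => !(PySem.Chars.isIn pvMarker l))).length + p := by
  induction ls generalizing p with
  | nil => simp [pvALoop]
  | cons l rest ih =>
    rw [pvALoop]
    by_cases h : PySem.Chars.isIn pvMarker l
    · simp [h]
    · have h' : PySem.Chars.isIn pvMarker l = false := by simpa using h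
      rw [if_neg (by simp [h']), ih (p + 1)]
      simp [h']
      omega

theorem pvMarker_ne_nil : pvMarker ≠ [] := by decide
theorem pvMarker_no_newline : '\n' ∉ pvMarker := by decide

theorem main_equiv (text : Option String) :
    get_latest_comment text = get_latest_comment_alt text := by
  cases text with
  | none => rfl
  | some s =>
    rw [get_latest_comment, get_latest_comment_alt]
    simp only []
    by_cases hm : '\n' ∈ s.toList
    · -- a newline exists: both sides work on the tail after the first '\n'
      have hinf : ['\n'] <:+: s.toList := (List.singleton_infix_iff '\n' s.toList).mpr hm
      have h0 : 0 ≤ PySem.Chars.find s.toList ['\n'] :=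
        (PySem.Chars.find_nonneg_iff s.toList ['\n']).mpr hinf
      obtain ⟨hpre, hmin⟩ := PySem.Chars.find_spec (s := s.toList) (sub := ['\n']) h0
      have hle := PySem.Chars.find_le_length s.toList ['\n']
      have hlen : (PySem.Chars.find s.toList ['\n']).toNat < s.toList.length := by
        by_contra hcon
        rw [List.drop_eq_nil_of_le (by omega)] at hpre
        simp at hpre
      have hget : s.toList[(PySem.Chars.find s.toList ['\n']).toNat] = '\n' := by
        have h1 := (singleton_prefix_iff '\n' _).mp hpre
        have h2 : s.toList[(PySem.Chars.find s.toList ['\n']).toNat]? = some '\n' := by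
          rw [List.drop_eq_getElem_cons hlen] at h1; simpa using h1
        rw [List.getElem?_eq_getElem hlen] at h2
        exact Option.some.inj h2
      have hdrop : s.toList.drop (PySem.Chars.find s.toList ['\n']).toNat =
          '\n' :: s.toList.drop ((PySem.Chars.find s.toList ['\n']).toNat + 1) := by
        rw [List.drop_eq_getElem_cons hlen, hget]
      have hsplit : s.toList = s.toList.take (PySem.Chars.find s.toList ['\n']).toNat ++
          '\n' :: s.toList.drop ((PySem.Chars.find s.toList ['\n']).toNat + 1) := by
        rw [← hdrop, List.take_append_drop]
      have hna : '\n' ∉ s.toList.take (PySem.Chars.find s.toList ['\n']).toNat := by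
        intro hmem
        obtain ⟨i, hi, hgi⟩ := List.mem_iff_getElem.mp hmem
        have hil : i < (PySem.Chars.find s.toList ['\n']).toNat := by
          have := List.length_take (l := s.toList) (i := (PySem.Chars.find s.toList ['\n']).toNat)
          omega
        apply hmin i hil
        rw [singleton_prefix_iff, List.head?_drop]
        have : i < s.toList.length := by omega
        rw [List.getElem?_eq_getElem this]
        rw [show s.toList[i] = (s.toList.take (PySem.Chars.find s.toList ['\n']).toNat)[i]
            from (List.getElem_take (h := hi)).symm, hgi]
      set a := s.toList.take (PySem.Chars.find s.toList ['\n']).toNat with hA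
      set b := s.toList.drop ((PySem.Chars.find s.toList ['\n']).toNat + 1) with hB
      obtain ⟨hne, hjoin, hmem⟩ := splitOn_props '\n' b.length b le_rfl
      set sp := PySem.Chars.splitOn b ['\n'] with hsp
      have hsOn : PySem.Chars.splitOn s.toList ['\n'] = a :: sp := by
        conv_lhs => rw [hsplit]
        exact splitOn_sep '\n' a b hna
      rw [hsOn]
      have hlenados : ¬ ((a :: sp).length ≤ 1) := by
        cases h : sp with
        | nil => exact absurd h hne
        | cons x xs => simp [h]
      rw [if_neg hlenados, if_neg (show ¬ (PySem.Chars.find s.toList ['\n'] = -1) by omega)]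
      have hrest : PySem.Chars.slice s.toList (some (PySem.Chars.find s.toList ['\n'] + 1)) none = b := by
        rw [PySem.Chars.slice_eq_listSlice, PySem.List.slice_from s.toList (by omega), hB]
        congr 1
        omega
      rw [hrest]
      -- A's loop counts marker-free lines
      set q : List Char → Bool := fun l => !(PySem.Chars.isIn pvMarker l) with hq
      set tw := sp.takeWhile q with htw
      have hpos : pvALoop (PySem.List.slice (a :: sp) (some 1) none) 1 = tw.length + 1 := by
        rw [PySem.List.slice_from_one]
        exact pvALoop_spec sp 1
      rw [hpos]
      have hsliceA : PySem.List.slice (a :: sp) (some 1) (some ((tw.length + 1 : Nat) : Int)) = tw := by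
        rw [PySem.List.slice_toNat (a :: sp) (by omega) (by omega)]
        simp
        exact (List.prefix_iff_eq_take.mp (List.takeWhile_prefix q)).symm
      rw [hsliceA]
      -- B's string scan
      rw [← hjoin]
      obtain ⟨bc1, bc2⟩ := bcore_spec pvMarker pvMarker_ne_nil pvMarker_no_newline sp hmem
      by_cases hidx : PySem.Chars.find (PySem.Chars.join ['\n'] sp) pvMarker = -1
      · rw [if_pos hidx]
        have : tw = sp := by
          rw [htw]
          exact List.takeWhile_eq_self_iff.mpr (fun x hx => by simp [hq, bc1 hidx x hx])
        rw [this]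
      · rw [if_neg hidx]
        have hidxge : 0 ≤ PySem.Chars.find (PySem.Chars.join ['\n'] sp) pvMarker := by
          have := PySem.Chars.neg_one_le_find (PySem.Chars.join ['\n'] sp) pvMarker
          omega
        have hidxle := PySem.Chars.find_le_length (PySem.Chars.join ['\n'] sp) pvMarker
        have hcut : PySem.Chars.rfindFrom (PySem.Chars.join ['\n'] sp) ['\n'] 0
            (some (PySem.Chars.find (PySem.Chars.join ['\n'] sp) pvMarker)) =
            if PySem.Chars.rfind ((PySem.Chars.join ['\n'] sp).take
                (PySem.Chars.find (PySem.Chars.join ['\n'] sp) pvMarker).toNat) ['\n'] = -1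
            then -1
            else PySem.Chars.rfind ((PySem.Chars.join ['\n'] sp).take
                (PySem.Chars.find (PySem.Chars.join ['\n'] sp) pvMarker).toNat) ['\n'] := by
          rw [PySem.Chars.rfindFrom]
          simp [show ¬ (((PySem.Chars.join ['\n'] sp).length : Int) <
              PySem.Chars.find (PySem.Chars.join ['\n'] sp) pvMarker) by omega,
            show ¬ (PySem.Chars.find (PySem.Chars.join ['\n'] sp) pvMarker < 0) by omega]
        rw [hcut]
        obtain ⟨bcA, bcB⟩ := bc2 hidx
        by_cases hcn : PySem.Chars.rfind ((PySem.Chars.join ['\n'] sp).take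
            (PySem.Chars.find (PySem.Chars.join ['\n'] sp) pvMarker).toNat) ['\n'] = -1
        · rw [if_pos hcn, if_pos rfl]
          have : tw = [] := htw ▸ bcA hcn
          rw [this, PySem.Chars.join_nil]
        · rw [if_neg hcn, if_neg hcn]
          have hcge : 0 ≤ PySem.Chars.rfind ((PySem.Chars.join ['\n'] sp).take
              (PySem.Chars.find (PySem.Chars.join ['\n'] sp) pvMarker).toNat) ['\n'] := by
            have := rfind_neg_one_le ((PySem.Chars.join ['\n'] sp).take
              (PySem.Chars.find (PySem.Chars.join ['\n'] sp) pvMarker).toNat) ['\n']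
            omega
          obtain ⟨hEq, _⟩ := bcB hcn
          rw [PySem.Chars.slice_eq_listSlice, PySem.List.slice_to (PySem.Chars.join ['\n'] sp) hcge, hEq]
    · -- no newline: both return the input unchanged
      have hfd : PySem.Chars.find s.toList ['\n'] = -1 :=
        (PySem.Chars.find_eq_neg_one_iff _ _).mpr
          (fun h => hm ((List.singleton_infix_iff '\n' s.toList).mp h))
      rw [splitOn_clean '\n' s.toList hm]
      simp [hfd]

-- ===== VERDICT (by name: the statement is the Claim_ definition above) =====
theorem get_latest_comment_spec : Claim_equal_get_latest_comment := by
  intro text _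
  show get_latest_comment text = get_latest_comment_alt text
  exact main_equiv text
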